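-- pv_equiv track=rewrite | github.com/Lafian/ComfyUI-Easy-Use | py/logic.py | to_xy
-- ===== SOURCE A (Python) =====
-- def to_xy(X, Y, direction):
--     new_x = list()
--     new_y = list()
--     if direction[0] == "horizontal":
--         for y in Y:
--             for x in X:
--                 new_x.append(x)
--                 new_y.append(y)
--     else:
--         for x in X:
--             for y in Y:
--                 new_x.append(x)
--                 new_y.append(y)
--
--     return (new_x, new_y)
-- ===== SOURCE B (Python) =====
-- def to_xy(X, Y, direction):
--     nx, ny = len(X), len(Y)
--     if direction[0] == "horizontal":
--         new_x = [X[i % nx] for i in range(nx * ny)]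
--         new_y = [Y[i // nx] for i in range(nx * ny)]
--     else:
--         new_x = [X[i // ny] for i in range(nx * ny)]
--         new_y = [Y[i % ny] for i in range(nx * ny)]
--     return (new_x, new_y)
-- ===== Notes on version B (the rewrite author's own statement) =====
-- stated objective: alternative
-- what changed: Replaces A's nested loops with index arithmetic: one flat pass over range(len(X)*len(Y)), recovering each coordinate from the flat index by modulo and floor division.
-- outside the precondition, e.g. on to_xy([1], [2], []): A raises IndexError, B raises IndexError
import Mathlib
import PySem

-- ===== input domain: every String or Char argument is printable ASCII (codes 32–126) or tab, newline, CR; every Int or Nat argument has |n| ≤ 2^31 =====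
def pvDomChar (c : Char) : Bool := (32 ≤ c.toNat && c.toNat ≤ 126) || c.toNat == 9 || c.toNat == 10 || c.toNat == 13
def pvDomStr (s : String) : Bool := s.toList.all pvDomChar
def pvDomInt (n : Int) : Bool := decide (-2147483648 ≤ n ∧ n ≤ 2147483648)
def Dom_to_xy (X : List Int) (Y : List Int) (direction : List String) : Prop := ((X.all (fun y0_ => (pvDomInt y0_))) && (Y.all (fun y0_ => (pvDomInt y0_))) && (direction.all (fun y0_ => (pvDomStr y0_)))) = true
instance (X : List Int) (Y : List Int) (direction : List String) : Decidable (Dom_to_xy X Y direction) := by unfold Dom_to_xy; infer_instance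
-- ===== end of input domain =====

-- B replaces A's nested loops by one flat pass over range(len(X)*len(Y)) that
-- recovers each coordinate from the flat index by % and // (objective: alternative).

-- ===== PORT A =====
def to_xy (X : List Int) (Y : List Int) (direction : List String) : List Int × List Int :=
  let init : List Int × List Int := ([], [])
  if PySem.List.pyGet? direction 0 = some "horizontal" then
    Y.foldl (fun acc y => X.foldl (fun acc2 x => (acc2.1 ++ [x], acc2.2 ++ [y])) acc) init
  else
    X.foldl (fun acc x => Y.foldl (fun acc2 y => (acc2.1 ++ [x], acc2.2 ++ [y])) acc) init

-- ===== PORT B =====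
-- In Source B the indices i % n and i // n are always in range when the comprehension
-- body runs (0 ≤ i < nx*ny), so pyGetD with default 0 is exact here.
def to_xy_alt (X : List Int) (Y : List Int) (direction : List String) : List Int × List Int :=
  let nx : Int := X.length
  let ny : Int := Y.length
  if PySem.List.pyGet? direction 0 = some "horizontal" then
    ((PySem.List.pyRange 0 (nx * ny) 1).map (fun i => PySem.List.pyGetD X (PySem.Int.mod i nx) 0),
     (PySem.List.pyRange 0 (nx * ny) 1).map (fun i => PySem.List.pyGetD Y (PySem.Int.floordiv i nx) 0))
  else
    ((PySem.List.pyRange 0 (nx * ny) 1).map (fun i => PySem.List.pyGetD X (PySem.Int.floordiv i ny) 0),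
     (PySem.List.pyRange 0 (nx * ny) 1).map (fun i => PySem.List.pyGetD Y (PySem.Int.mod i ny) 0))

-- ===== PRECONDITION & SPEC =====
-- Pre_ excludes only empty `direction`, on which A raises IndexError (direction[0]).
def Pre_to_xy (X : List Int) (Y : List Int) (direction : List String) : Prop := direction ≠ []
instance (X : List Int) (Y : List Int) (direction : List String) : Decidable (Pre_to_xy X Y direction) := by unfold Pre_to_xy; infer_instance
def pvWitness_to_xy : List Int × List Int × List String := ([1, 2], [5], ["horizontal"])
def Spec_to_xy (X : List Int) (Y : List Int) (direction : List String) (out : List Int × List Int) : Prop := out = to_xy_alt X Y direction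
instance (X : List Int) (Y : List Int) (direction : List String) (out : List Int × List Int) : Decidable (Spec_to_xy X Y direction out) := by unfold Spec_to_xy; infer_instance

-- ===== CLAIM =====
def Claim_equal_to_xy : Prop := ∀ (X : List Int) (Y : List Int) (direction : List String), Dom_to_xy X Y direction → Pre_to_xy X Y direction → Spec_to_xy X Y direction (to_xy X Y direction)

-- ===== LEMMAS AND PROOFS =====
-- A's inner loop over L pairs each element with the fixed v and appends to both lists.
theorem inner_fold (L : List Int) (v : Int) (a b : List Int) :
    L.foldl (fun acc2 x => (acc2.1 ++ [x], acc2.2 ++ [v])) (a, b)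
      = (a ++ L, b ++ List.replicate L.length v) := by
  induction L generalizing a b with
  | nil => simp
  | cons h t ih =>
      simp only [List.foldl_cons, ih, List.append_assoc, List.singleton_append]
      simp [List.replicate_succ]

-- A's outer loop over L accumulates one copy of M per element, and the elements replicated.
theorem outer_fold (L M : List Int) (a b : List Int) :
    L.foldl (fun acc y => M.foldl (fun acc2 x => (acc2.1 ++ [x], acc2.2 ++ [y])) acc) (a, b)
      = (a ++ (List.replicate L.length M).flatten,
         b ++ L.flatMap (List.replicate M.length)) := by
  induction L generalizing a b with
  | nil => simp
  | cons h t ih =>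
      simp [List.foldl_cons, inner_fold, ih, List.replicate_succ, List.flatMap_cons,
        List.append_assoc]

-- mirror for the else branch
theorem inner_fold' (L : List Int) (v : Int) (a b : List Int) :
    L.foldl (fun acc2 y => (acc2.1 ++ [v], acc2.2 ++ [y])) (a, b)
      = (a ++ List.replicate L.length v, b ++ L) := by
  induction L generalizing a b with
  | nil => simp
  | cons h t ih =>
      simp only [List.foldl_cons, ih, List.append_assoc, List.singleton_append]
      simp [List.replicate_succ]

theorem outer_fold' (L M : List Int) (a b : List Int) :
    L.foldl (fun acc x => M.foldl (fun acc2 y => (acc2.1 ++ [x], acc2.2 ++ [y])) acc) (a, b)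
      = (a ++ L.flatMap (List.replicate M.length),
         b ++ (List.replicate L.length M).flatten) := by
  induction L generalizing a b with
  | nil => simp
  | cons h t ih =>
      simp [List.foldl_cons, inner_fold', ih, List.replicate_succ, List.flatMap_cons,
        List.append_assoc]

-- B's modulo pass equals ny concatenated copies of X
theorem mod_pass (X : List Int) (ny : Nat) :
    (List.range (X.length * ny)).map (fun i => X.getD (i % X.length) 0)
      = (List.replicate ny X).flatten := by
  induction ny with
  | zero => simp
  | succ n ih =>
      have hX : (List.range X.length).map (fun i => X.getD ((X.length * n + i) % X.length) 0)
          = X := by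
        apply List.ext_getElem
        · simp
        · intro k h1 h2
          have hmod : k % X.length = k := Nat.mod_eq_of_lt h2
          simp [hmod, List.getElem?_eq_getElem h2]
      rw [Nat.mul_succ, List.range_add, List.map_append, ih,
        List.replicate_succ' , List.flatten_append]
      simp only [List.flatten_cons, List.flatten_nil, List.append_nil]
      congr 1
      rw [List.map_map]
      simpa [Function.comp_def] using hX

-- B's floor-division pass equals each Y element replicated nx times, in order
theorem div_pass (Y : List Int) (nx : Nat) :
    (List.range (nx * Y.length)).map (fun i => Y.getD (i / nx) 0)
      = Y.flatMap (List.replicate nx) := by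
  rcases Nat.eq_zero_or_pos nx with h | h
  · simp [h]
  · induction Y using List.reverseRecOn with
    | nil => simp
    | append_singleton t y ih =>
        rw [List.length_append, List.length_singleton, Nat.mul_add, Nat.mul_one,
          List.range_add, List.map_append, List.flatMap_append]
        congr 1
        · rw [← ih]
          apply List.map_congr_left
          intro i hi
          simp only [List.mem_range] at hi
          have hlt : i / nx < t.length := Nat.div_lt_of_lt_mul (by omega)
          have h2 : i / nx < (t ++ [y]).length := by simp; omega
          rw [List.getD_eq_getElem _ 0 h2, List.getD_eq_getElem _ 0 hlt,
            List.getElem_append_left hlt]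
        · apply List.ext_getElem
          · simp
          · intro k h1 h2
            simp only [List.length_map, List.length_range] at h1
            have hdiv : (nx * t.length + k) / nx = t.length := by
              rw [Nat.mul_add_div h, Nat.div_eq_of_lt h1]
              omega
            simp only [List.getElem_map, List.getElem_range,
              List.flatMap_singleton, List.getElem_replicate]
            rw [hdiv]
            have hlen : t.length < (t ++ [y]).length := by simp
            rw [List.getD_eq_getElem _ 0 hlen, List.getElem_append_right (Nat.le_refl _)]
            simp

-- turn B's pyRange/pyGetD pass into the Nat-indexed form above
theorem alt_pass_mod (X : List Int) (m : Nat) :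
    (PySem.List.pyRange 0 ((X.length : Int) * (m : Int)) 1).map
        (fun i => PySem.List.pyGetD X (PySem.Int.mod i (X.length : Int)) 0)
      = (List.range (X.length * m)).map (fun i => X.getD (i % X.length) 0) := by
  have hc : ((X.length : Int) * (m : Int)) = ((X.length * m : Nat) : Int) := by push_cast; ring
  rw [hc, PySem.List.pyRange_zero_natCast, List.map_map]
  apply List.map_congr_left
  intro i _
  show PySem.List.pyGetD X (PySem.Int.mod (i : Int) (X.length : Int)) 0 = X.getD (i % X.length) 0
  rw [PySem.Int.mod_natCast, PySem.List.pyGetD_natCast]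

theorem alt_pass_div (Y : List Int) (nx m : Nat) (hm : m = nx * Y.length) :
    (PySem.List.pyRange 0 ((nx : Int) * (Y.length : Int)) 1).map
        (fun i => PySem.List.pyGetD Y (PySem.Int.floordiv i (nx : Int)) 0)
      = (List.range m).map (fun i => Y.getD (i / nx) 0) := by
  have hc : ((nx : Int) * (Y.length : Int)) = ((m : Nat) : Int) := by subst hm; push_cast; ring
  rw [hc, PySem.List.pyRange_zero_natCast, List.map_map]
  apply List.map_congr_left
  intro i _
  show PySem.List.pyGetD Y (PySem.Int.floordiv (i : Int) (nx : Int)) 0 = Y.getD (i / nx) 0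
  rw [PySem.Int.floordiv_natCast, PySem.List.pyGetD_natCast]

-- ===== VERDICT =====
theorem to_xy_spec : Claim_equal_to_xy := by
  intro X Y direction _ _
  unfold Spec_to_xy
  simp only [to_xy, to_xy_alt]
  split
  · rw [outer_fold]
    refine Prod.ext ?_ ?_
    · show _ = (PySem.List.pyRange 0 ((X.length : Int) * (Y.length : Int)) 1).map
        (fun i => PySem.List.pyGetD X (PySem.Int.mod i (X.length : Int)) 0)
      rw [alt_pass_mod X Y.length, mod_pass]
      simp
    · show _ = (PySem.List.pyRange 0 ((X.length : Int) * (Y.length : Int)) 1).map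
        (fun i => PySem.List.pyGetD Y (PySem.Int.floordiv i (X.length : Int)) 0)
      rw [alt_pass_div Y X.length (X.length * Y.length) rfl, div_pass]
      simp
  · rw [outer_fold']
    refine Prod.ext ?_ ?_
    · show _ = (PySem.List.pyRange 0 ((X.length : Int) * (Y.length : Int)) 1).map
        (fun i => PySem.List.pyGetD X (PySem.Int.floordiv i (Y.length : Int)) 0)
      have hc : ((X.length : Int) * (Y.length : Int)) = ((Y.length : Int) * (X.length : Int)) := by ring
      rw [hc, alt_pass_div X Y.length (Y.length * X.length) rfl, div_pass]
      simp
    · show _ = (PySem.List.pyRange 0 ((X.length : Int) * (Y.length : Int)) 1).map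
        (fun i => PySem.List.pyGetD Y (PySem.Int.mod i (Y.length : Int)) 0)
      have hc : ((X.length : Int) * (Y.length : Int)) = ((Y.length : Int) * (X.length : Int)) := by ring
      rw [hc, alt_pass_mod Y X.length, Nat.mul_comm Y.length X.length,
        Nat.mul_comm X.length Y.length, mod_pass]
      simp
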